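-- pv_equiv track=rewrite | github.com/Vignesh2712/sqlmap- | tamper/charunicodeescape.py | tamper
-- ===== SOURCE A (Python) =====
-- import string
--
-- def tamper(payload, **kwargs):
--     """
--     Unicode-escapes non-encoded characters in a given payload (not
--     processing already encoded)
--
--     Notes:
--         * Useful to bypass weak filtering and/or WAFs in JSON contexes
--
--     >>> tamper('SELECT FIELD FROM TABLE')
--     '\\\\u0053\\\\u0045\\\\u004C\\\\u0045\\\\u0043\\\\u0054\\\\u0020\\\\u0046\\\\u0049\\\\u0045\\\\u004C\\\\u0044\\\\u0020\\\\u0046\\\\u0052\\\\u004F\\\\u004D\\\\u0020\\\\u0054\\\\u0041\\\\u0042\\\\u004C\\\\u0045'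
--     """
--
--     retVal = payload
--
--     if payload:
--         retVal = ""
--         i = 0
--         payloadLength = len(payload)
--
--         while i < payloadLength:
--             if payload[i] == '%' and (i < payloadLength - 2) and payload[i + 1:i + 2] in string.hexdigits and payload[i + 2:i + 3] in string.hexdigits:
--                 retVal += "\\u00%s" % payload[i + 1:i + 3]
--                 i += 3
--             else:
--                 retVal += '\\u%.4X' % ord(payload[i])
--                 i += 1
--
--     return retVal
-- ===== SOURCE B (Python) =====
-- import string
--
-- def tamper(payload, **kwargs):
--     if not payload:
--         return payload
--
--     def esc(s):
--         return ''.join('\\u%.4X' % ord(c) for c in s)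
--
--     parts = payload.split('%')
--     out = [esc(parts[0])]
--     for part in parts[1:]:
--         if len(part) >= 2 and part[0] in string.hexdigits and part[1] in string.hexdigits:
--             out.append('\\u00' + part[0] + part[1] + esc(part[2:]))
--         else:
--             out.append('\\u0025' + esc(part))
--     return ''.join(out)
-- ===== Notes on version B (the rewrite author's own statement) =====
-- stated objective: faster
-- what changed: A walks a cursor over the payload appending to one string with a two-character lookahead at each percent sign; B splits the payload on the percent separator once, escapes each piece (keeping a leading hex digit pair of a piece verbatim), and joins the pieces at the end.
import Mathlib
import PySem

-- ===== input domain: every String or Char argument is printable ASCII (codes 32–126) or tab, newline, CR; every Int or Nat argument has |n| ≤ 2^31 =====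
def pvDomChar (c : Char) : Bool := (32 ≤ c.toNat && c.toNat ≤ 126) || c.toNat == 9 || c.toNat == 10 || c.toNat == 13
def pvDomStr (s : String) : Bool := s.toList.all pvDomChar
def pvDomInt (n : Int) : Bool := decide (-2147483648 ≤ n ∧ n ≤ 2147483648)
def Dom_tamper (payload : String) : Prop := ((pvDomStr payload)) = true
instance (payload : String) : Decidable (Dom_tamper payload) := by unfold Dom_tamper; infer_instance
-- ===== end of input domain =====

-- B replaces A's manual cursor-and-lookahead loop by splitting the payload on '%' and
-- escaping each piece via join (objective: faster — avoids A's repeated string concatenation; measured faster in a timing run).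


-- ===== PORT A =====
-- string.hexdigits membership of a one-character slice (exact: the slice has length 1 here)
def pvIsHex (c : Char) : Bool := "0123456789abcdefABCDEF".toList.contains c

-- A's compound guard "i < payloadLength - 2 and payload[i+1] in hexdigits and payload[i+2] in
-- hexdigits", read on the characters t after the cursor
def pvStartHexHex : List Char → Bool
  | a :: b :: _ => pvIsHex a && pvIsHex b
  | _ => false

-- '%.4X' % n : 4-digit zero-padded uppercase hex (exact for n < 0x10000; Dom chars are ≤ 126)
def pvHexUpDigit (n : Nat) : Char := if n < 10 then Char.ofNat (48 + n) else Char.ofNat (55 + n)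
def pvHex4 (n : Nat) : List Char :=
  [pvHexUpDigit (n / 4096 % 16), pvHexUpDigit (n / 256 % 16),
   pvHexUpDigit (n / 16 % 16), pvHexUpDigit (n % 16)]

-- A's while loop over the cursor i, as structural recursion on the remaining characters
def tamperLoopA : List Char → List Char
  | [] => []
  | c :: t =>
    if hc : c = '%' ∧ pvStartHexHex t = true then
      match t, hc.2 with
      | h1 :: h2 :: r, _ => '\\' :: 'u' :: '0' :: '0' :: h1 :: h2 :: tamperLoopA r
      | [], h => nomatch h
      | [_], h => nomatch h
    else ('\\' :: 'u' :: pvHex4 c.toNat) ++ tamperLoopA t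

def tamper (payload : String) : String :=
  if payload = "" then payload
  else String.ofList (tamperLoopA payload.toList)

-- ===== PORT B =====
-- esc(s) = ''.join('\\u%.4X' % ord(c) for c in s)
def pvEscB (s : List Char) : List Char :=
  (s.map (fun c => '\\' :: 'u' :: pvHex4 c.toNat)).flatten

-- the body of B's for-loop over one split part
def pvProcPart : List Char → List Char
  | h1 :: h2 :: r =>
    if pvIsHex h1 && pvIsHex h2 then
      '\\' :: 'u' :: '0' :: '0' :: h1 :: h2 :: pvEscB r
    else '\\' :: 'u' :: '0' :: '0' :: '2' :: '5' :: pvEscB (h1 :: h2 :: r)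
  | part => '\\' :: 'u' :: '0' :: '0' :: '2' :: '5' :: pvEscB part

def tamper_alt (payload : String) : String :=
  if payload = "" then payload
  else
    match payload.toList.splitOn '%' with
    | [] => ""  -- unreachable: splitOn never returns []
    | p0 :: rest => String.ofList (pvEscB p0 ++ (rest.map pvProcPart).flatten)

-- ===== PRECONDITION & SPEC =====
def Spec_tamper (payload : String) (out : String) : Prop := out = tamper_alt payload
instance (payload : String) (out : String) : Decidable (Spec_tamper payload out) := by unfold Spec_tamper; infer_instance

-- ===== CLAIM (what is proved, stated in full; the proofs are below) =====
def Claim_equal_tamper : Prop := ∀ (payload : String), Dom_tamper payload → Spec_tamper payload (tamper payload)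

-- ===== LEMMAS AND PROOFS =====
theorem pvIsHex_ne_pct {c : Char} (h : pvIsHex c = true) : ¬ (c = '%') := by
  rintro rfl; simp [pvIsHex] at h

theorem hex4_pct : pvHex4 ('%'.toNat) = ['0', '0', '2', '5'] := by decide

-- one-step unfoldings of A's loop
theorem loopA_pct_hex {h1 h2 : Char} (r : List Char)
    (e1 : pvIsHex h1 = true) (e2 : pvIsHex h2 = true) :
    tamperLoopA ('%' :: h1 :: h2 :: r) = '\\' :: 'u' :: '0' :: '0' :: h1 :: h2 :: tamperLoopA r := by
  rw [tamperLoopA, dif_pos ⟨rfl, by simp [pvStartHexHex, e1, e2]⟩]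

theorem loopA_pct_else {t : List Char} (h : pvStartHexHex t = false) :
    tamperLoopA ('%' :: t) = ('\\' :: 'u' :: pvHex4 ('%'.toNat)) ++ tamperLoopA t := by
  rw [tamperLoopA, dif_neg (by simp [h])]

theorem loopA_ne {c : Char} (t : List Char) (h : ¬ (c = '%')) :
    tamperLoopA (c :: t) = ('\\' :: 'u' :: pvHex4 c.toNat) ++ tamperLoopA t := by
  rw [tamperLoopA, dif_neg (by simp [h])]

theorem procPart_not_hexhex {part : List Char} (h : pvStartHexHex part = false) :
    pvProcPart part = '\\' :: 'u' :: '0' :: '0' :: '2' :: '5' :: pvEscB part := by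
  match part with
  | [] => rfl
  | [a] => rfl
  | a :: b :: r =>
    simp only [pvStartHexHex] at h
    simp [pvProcPart, h]

-- splitOn facts specialised to our separator
theorem splitOn_nil_pct : ([] : List Char).splitOn '%' = [[]] := rfl

theorem splitOn_cons_pct (t : List Char) :
    ('%' :: t).splitOn '%' = [] :: t.splitOn '%' := by
  simp [List.splitOn, List.splitOnP_cons]

theorem splitOn_cons_ne {c : Char} (t q0 : List Char) (qr : List (List Char))
    (h : ¬ (c = '%')) (ht : t.splitOn '%' = q0 :: qr) :
    (c :: t).splitOn '%' = (c :: q0) :: qr := by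
  have ht' : List.splitOnP (· == '%') t = q0 :: qr := ht
  simp [List.splitOn, List.splitOnP_cons, h, ht']

theorem splitOn_head_cons {t x : List Char} {b : Char} {pr : List (List Char)}
    (hs : t.splitOn '%' = (b :: x) :: pr) : ∃ t'', t = b :: t'' := by
  match t with
  | [] =>
    rw [splitOn_nil_pct] at hs
    injection hs with e1 _; exact absurd e1.symm (by simp)
  | c :: t'' =>
    by_cases hc : c = '%'
    · subst hc; rw [splitOn_cons_pct] at hs
      injection hs with e1 _; exact absurd e1.symm (by simp)
    · obtain ⟨q0, qr, hq⟩ := List.exists_cons_of_ne_nil (List.splitOnP_ne_nil (· == '%') t'')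
      have hq : t''.splitOn '%' = q0 :: qr := hq
      rw [splitOn_cons_ne t'' q0 qr hc hq] at hs
      injection hs with e1 _
      injection e1 with e3 _; exact ⟨t'', by rw [e3]⟩

theorem startHexHex_of_split {t q0 : List Char} {qr : List (List Char)}
    (hs : t.splitOn '%' = q0 :: qr) (h : pvStartHexHex q0 = true) :
    pvStartHexHex t = true := by
  match t with
  | [] =>
    rw [splitOn_nil_pct] at hs
    injection hs with e1 _; rw [← e1] at h; simp [pvStartHexHex] at h
  | a :: t' =>
    by_cases ha : a = '%'
    · subst ha; rw [splitOn_cons_pct] at hs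
      injection hs with e1 _; rw [← e1] at h; simp [pvStartHexHex] at h
    · obtain ⟨p0', pr, hp⟩ := List.exists_cons_of_ne_nil (List.splitOnP_ne_nil (· == '%') t')
      have hp : t'.splitOn '%' = p0' :: pr := hp
      rw [splitOn_cons_ne t' p0' pr ha hp] at hs
      injection hs with e1 _
      rw [← e1] at h
      match p0', hp, h with
      | [], hp, h => simp [pvStartHexHex] at h
      | b :: x, hp, h =>
        obtain ⟨t'', rfl⟩ := splitOn_head_cons hp
        simp only [pvStartHexHex] at h ⊢
        exact h

theorem mainLemma : ∀ n (l : List Char) (p0 : List Char) (rest : List (List Char)),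
    l.length ≤ n → l.splitOn '%' = p0 :: rest →
    tamperLoopA l = pvEscB p0 ++ (rest.map pvProcPart).flatten := by
  intro n
  induction n with
  | zero =>
    intro l p0 rest hn hs
    have hl : l = [] := by cases l with | nil => rfl | cons => simp at hn
    subst hl
    rw [splitOn_nil_pct] at hs
    injection hs with e1 e2
    rw [← e1, ← e2]; simp [tamperLoopA, pvEscB]
  | succ n ih =>
    intro l p0 rest hn hs
    match l with
    | [] =>
      rw [splitOn_nil_pct] at hs
      injection hs with e1 e2
      rw [← e1, ← e2]; simp [tamperLoopA, pvEscB]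
    | c :: t =>
      by_cases hc : c = '%'
      · subst hc
        rw [splitOn_cons_pct] at hs
        injection hs with h1 h2; subst h2
        obtain ⟨q0, qr, ht⟩ := List.exists_cons_of_ne_nil (List.splitOnP_ne_nil (· == '%') t)
        have ht : t.splitOn '%' = q0 :: qr := ht
        by_cases hhh : pvStartHexHex t = true
        · match t, hhh with
          | h1' :: h2' :: r, hhh =>
            simp only [pvStartHexHex, Bool.and_eq_true] at hhh
            obtain ⟨s0, sr, hr⟩ := List.exists_cons_of_ne_nil (List.splitOnP_ne_nil (· == '%') r)
            have hr : r.splitOn '%' = s0 :: sr := hr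
            have he2 := splitOn_cons_ne r s0 sr (pvIsHex_ne_pct hhh.2) hr
            have he1 := splitOn_cons_ne (h2' :: r) (h2' :: s0) sr (pvIsHex_ne_pct hhh.1) he2
            have hrec := ih r s0 sr (by simp at hn ⊢; omega) hr
            rw [loopA_pct_hex r hhh.1 hhh.2, hrec, ← h1, he1]
            simp [pvProcPart, pvEscB, hhh.1, hhh.2]
        · have hhh' : pvStartHexHex t = false := by simpa using hhh
          have hq0 : pvStartHexHex q0 = false := by
            by_contra hq; simp only [Bool.not_eq_false] at hq
            rw [startHexHex_of_split ht hq] at hhh'; exact absurd hhh' (by simp)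
          have hrec := ih t q0 qr (by simp at hn ⊢; omega) ht
          rw [loopA_pct_else hhh', hex4_pct, hrec, ← h1, ht]
          simp [pvEscB, procPart_not_hexhex hq0]
      · obtain ⟨q0, qr, ht⟩ := List.exists_cons_of_ne_nil (List.splitOnP_ne_nil (· == '%') t)
        have ht : t.splitOn '%' = q0 :: qr := ht
        rw [splitOn_cons_ne t q0 qr hc ht] at hs
        injection hs with h1 h2; subst h2
        have hrec := ih t q0 qr (by simp at hn ⊢; omega) ht
        rw [loopA_ne t hc, hrec, ← h1]
        simp [pvEscB]

-- ===== VERDICT (by name: the statement is the Claim_ definition above) =====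
theorem tamper_spec : Claim_equal_tamper := by
  intro payload _
  unfold Spec_tamper tamper tamper_alt
  by_cases h : payload = ""
  · simp [h]
  · simp only [if_neg h]
    obtain ⟨p0, rest, hs⟩ :=
      List.exists_cons_of_ne_nil (List.splitOnP_ne_nil (· == '%') payload.toList)
    have hs : payload.toList.splitOn '%' = p0 :: rest := hs
    rw [hs]
    rw [mainLemma payload.toList.length payload.toList p0 rest le_rfl hs]
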